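-- pv_equiv track=rewrite | github.com/LynPtl/AlgorithmStudy | 9021_redo/24T3/24T3Q1.py | f
-- ===== SOURCE A (Python) =====
-- def f(n):
--     """
--     >>> f(1)
--     ((1,), (1,))
--     >>> f(2)
--     ((1, 2), (2, 1))
--     >>> f(3)
--     ((1, 2, 4), (4, 2, 1))
--     >>> f(4)
--     ((1, 2, 4, 7), (7, 4, 2, 1))
--     >>> f(5)
--     ((1, 2, 4, 7, 11), (11, 7, 4, 2, 1))
--     >>> f(6)
--     ((1, 2, 4, 7, 11, 16), (16, 11, 7, 4, 2, 1))
--     >>> f(7)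
--     ((1, 2, 4, 7, 11, 16, 22), (22, 16, 11, 7, 4, 2, 1))
--     >>> f(8)
--     ((1, 2, 4, 7, 11, 16, 22, 29), (29, 22, 16, 11, 7, 4, 2, 1))
--     """
--     if n == 1:
--         return ((1,),(1,))
--     list1 = []
--     for i in range(n):
--         if i == 0:
--             list1.append(1)
--         else:
--             list1.append(list1[-1] + i)
--     return (tuple(list1),tuple(list(reversed(list1))))
--     #sample answer
--     """
--     count = 1
--     res = []
--     for i in range(n):
--         count += 1
--         res.append(count)
--     return tuple(res),tuple(reversed(res))
--     """
-- ===== SOURCE B (Python) =====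
-- def f(n):
--     fwd = tuple(1 + i * (i + 1) // 2 for i in range(n))
--     return (fwd, fwd[::-1])
-- ===== Notes on version B (the rewrite author's own statement) =====
-- stated objective: simpler
-- what changed: Each element is computed independently from the closed form 1 + i*(i+1)//2 instead of accumulating a running sum with a last-element lookup, and the n==1 special case is dropped as redundant.
import Mathlib
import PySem

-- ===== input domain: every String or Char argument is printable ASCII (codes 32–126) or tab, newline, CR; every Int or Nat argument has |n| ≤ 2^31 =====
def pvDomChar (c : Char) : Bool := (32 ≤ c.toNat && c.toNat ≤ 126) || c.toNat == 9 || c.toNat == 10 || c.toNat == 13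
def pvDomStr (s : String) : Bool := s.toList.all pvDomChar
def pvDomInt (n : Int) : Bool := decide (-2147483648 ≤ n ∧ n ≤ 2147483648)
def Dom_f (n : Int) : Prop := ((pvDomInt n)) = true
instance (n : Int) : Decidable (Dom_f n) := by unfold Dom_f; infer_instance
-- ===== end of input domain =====

-- B computes each element independently from the closed form 1 + i*(i+1)//2 instead of
-- A's running-sum accumulation with a list1[-1] lookup, and drops A's redundant n==1 case (simpler).

-- ===== PORT A =====
-- list1[-1] is ported with (pyGet? acc (-1)).getD 0; the default 0 is never used, since the
-- lookup only happens for i ≠ 0, after i = 0 already appended 1 (so acc is nonempty; exact there).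
def f (n : Int) : List Int × List Int :=
  if n == 1 then ([1], [1])
  else
    let list1 := (PySem.List.pyRange 0 n 1).foldl
      (fun acc i => if i == 0 then acc ++ [1]
                    else acc ++ [(PySem.List.pyGet? acc (-1)).getD 0 + i]) []
    (list1, list1.reverse)

-- ===== PORT B =====
def f_alt (n : Int) : List Int × List Int :=
  let fwd := (PySem.List.pyRange 0 n 1).map (fun i => 1 + PySem.Int.floordiv (i * (i + 1)) 2)
  (fwd, fwd.reverse)

-- ===== PRECONDITION & SPEC =====
def Spec_f (n : Int) (out : List Int × List Int) : Prop := out = f_alt n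
instance (n : Int) (out : List Int × List Int) : Decidable (Spec_f n out) := by unfold Spec_f; infer_instance

-- ===== CLAIM (what is proved, stated in full; the proofs are below) =====
def Claim_equal_f : Prop := ∀ (n : Int), Dom_f n → Spec_f n (f n)

-- ===== LEMMAS AND PROOFS =====

def pvG (i : Int) : Int := 1 + PySem.Int.floordiv (i * (i + 1)) 2

lemma pvFdiv_two_double (r : Int) : PySem.Int.floordiv (r + r) 2 = r := by
  rw [PySem.Int.floordiv_eq_ediv_of_pos (by norm_num)]
  omega

lemma pvG_succ (i : Int) (_hi : 0 < i) : pvG (i - 1) + i = pvG i := by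
  obtain ⟨a, ha⟩ := Int.even_mul_succ_self (i - 1)
  have h2 : i * (i + 1) = (a + i) + (a + i) := by ring_nf; ring_nf at ha; omega
  unfold pvG
  have ha' : (i - 1) * (i - 1 + 1) = a + a := ha
  rw [ha', h2, pvFdiv_two_double, pvFdiv_two_double]
  ring

lemma pv025 (m : Nat) :
    (PySem.List.pyRange 0 m 1).foldl
      (fun acc i => if i == 0 then acc ++ [1]
                    else acc ++ [(PySem.List.pyGet? acc (-1)).getD 0 + i]) []
    = (PySem.List.pyRange 0 m 1).map pvG := by
  induction m with
  | zero => decide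
  | succ k ih =>
    have hsplit : PySem.List.pyRange 0 ((k : Int) + 1) 1
        = PySem.List.pyRange 0 k 1 ++ [(k : Int)] :=
      PySem.List.pyRange_one_succ_right (by exact_mod_cast Nat.zero_le k)
    push_cast
    rw [hsplit, List.foldl_append, List.map_append, ih, List.foldl_cons, List.foldl_nil]
    by_cases hk : k = 0
    · subst hk; decide
    · have hk' : ((k : Int) == 0) = false := by
        simp; exact_mod_cast hk
      rw [hk']
      simp only [List.map_cons, List.map_nil]
      have h1 : PySem.List.pyRange 0 (k : Int) 1
          = PySem.List.pyRange 0 ((k : Int) - 1) 1 ++ [(k : Int) - 1] := by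
        have := PySem.List.pyRange_one_succ_right
          (a := 0) (b := (k : Int) - 1) (by omega)
        simpa using this
      have hlast : ((PySem.List.pyRange 0 (k : Int) 1).map pvG).getLast?
          = some (pvG ((k : Int) - 1)) := by
        rw [h1, List.map_append]; simp
      rw [PySem.List.pyGet?_neg_one, hlast, Option.getD_some]
      have := pvG_succ (k : Int) (by exact_mod_cast Nat.pos_of_ne_zero hk)
      simp [this]

lemma pvRange_toNat (n : Int) : PySem.List.pyRange 0 n 1 = PySem.List.pyRange 0 (n.toNat : Int) 1 := by
  by_cases h : n ≤ 0
  · rw [PySem.List.pyRange_one_eq_nil h, PySem.List.pyRange_one_eq_nil (by omega)]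
  · congr 1; omega

-- ===== VERDICT (by name: the statement is the Claim_ definition above) =====
theorem f_spec : Claim_equal_f := by
  intro n _
  unfold Spec_f f f_alt
  have hmain : (PySem.List.pyRange 0 n 1).foldl
      (fun acc i => if i == 0 then acc ++ [1]
                    else acc ++ [(PySem.List.pyGet? acc (-1)).getD 0 + i]) []
      = (PySem.List.pyRange 0 n 1).map (fun i => 1 + PySem.Int.floordiv (i * (i + 1)) 2) := by
    rw [pvRange_toNat n, pv025 n.toNat]
    rfl
  by_cases h1 : n = 1
  · subst h1; decide
  · have h1' : (n == 1) = false := by simp [h1]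
    rw [h1', hmain]
    simp
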